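-- pv_equiv track=rewrite | github.com/deepakkt/aasaan | aasaan/statistics/views.py | get_iyc_list
-- ===== SOURCE A (Python) =====
-- from collections import Counter
--
-- def get_iyc_list(months, stats_list, iyc_zone):
--     monthly_list = {}
--     x = Counter()
--     y = Counter()
--     for entry in stats_list:
--         x[entry[2]] += entry[3]
--         y[entry[2]] += entry[4]
--     for month in months:
--         monthly_list[month] = {}
--         mn = {}
--         mn[iyc_zone] =[x[month],y[month]]
--         monthly_list[month].update(mn)
--     return monthly_list
-- ===== SOURCE B (Python) =====
-- def get_iyc_list(months, stats_list, iyc_zone):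
--     return {month: {iyc_zone: [sum(e[3] for e in stats_list if e[2] == month),
--                                sum(e[4] for e in stats_list if e[2] == month)]}
--             for month in months}
-- ===== Notes on version B (the rewrite author's own statement) =====
-- stated objective: simpler
-- what changed: Replaces the two pre-built Counters and the dict-mutation loop by a single dict comprehension that rescans stats_list per month to sum the two columns directly.
import Mathlib
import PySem

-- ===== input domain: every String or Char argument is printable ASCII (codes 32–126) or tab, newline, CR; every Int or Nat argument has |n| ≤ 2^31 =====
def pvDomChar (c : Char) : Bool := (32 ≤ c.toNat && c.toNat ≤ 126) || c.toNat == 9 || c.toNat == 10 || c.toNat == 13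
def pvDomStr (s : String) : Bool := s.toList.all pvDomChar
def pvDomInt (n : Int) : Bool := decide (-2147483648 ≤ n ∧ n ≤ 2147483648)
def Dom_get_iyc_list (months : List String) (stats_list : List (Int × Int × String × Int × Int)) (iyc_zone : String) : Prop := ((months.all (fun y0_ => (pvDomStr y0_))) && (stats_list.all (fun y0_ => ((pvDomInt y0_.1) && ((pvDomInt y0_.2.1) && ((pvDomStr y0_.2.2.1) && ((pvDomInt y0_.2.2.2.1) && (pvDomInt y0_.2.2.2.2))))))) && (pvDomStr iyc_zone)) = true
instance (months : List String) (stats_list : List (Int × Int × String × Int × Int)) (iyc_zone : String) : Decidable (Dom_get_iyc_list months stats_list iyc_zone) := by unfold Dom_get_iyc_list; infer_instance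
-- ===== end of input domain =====

-- B replaces A's two pre-built Counters and the dict-mutation loop by a single dict
-- comprehension that rescans stats_list per month (objective: simpler).

-- ===== PORT A =====
def get_iyc_list (months : List String) (stats_list : List (Int × Int × String × Int × Int)) (iyc_zone : String) : List (String × List (String × List Int)) :=
  -- x = Counter(); y = Counter(); for entry in stats_list: x[entry[2]] += entry[3]; y[entry[2]] += entry[4]
  let x : PySem.Dict String Int :=
    stats_list.foldl (fun d e => d.modify e.2.2.1 0 (fun v => v + e.2.2.2.1)) PySem.Dict.empty
  let y : PySem.Dict String Int :=
    stats_list.foldl (fun d e => d.modify e.2.2.1 0 (fun v => v + e.2.2.2.2)) PySem.Dict.empty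
  -- for month in months: monthly_list[month] = {}; mn = {}; mn[iyc_zone] = [x[month], y[month]]; monthly_list[month].update(mn)
  let monthly_list : PySem.Dict String (List (String × List Int)) :=
    months.foldl (fun ml month =>
      let mn : PySem.Dict String (List Int) :=
        (PySem.Dict.empty : PySem.Dict String (List Int)).insert iyc_zone [x.getD month 0, y.getD month 0]
      ml.insert month (((PySem.Dict.empty : PySem.Dict String (List Int)).update mn.items).items))
      PySem.Dict.empty
  monthly_list.items

-- ===== PORT B =====
def get_iyc_list_alt (months : List String) (stats_list : List (Int × Int × String × Int × Int)) (iyc_zone : String) : List (String × List (String × List Int)) :=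
  -- {month: {iyc_zone: [sum(e[3] ... if e[2]==month), sum(e[4] ... if e[2]==month)]} for month in months}
  (months.foldl (fun ml month =>
      ml.insert month [(iyc_zone,
        [((stats_list.filter (fun e => e.2.2.1 == month)).map (fun e => e.2.2.2.1)).sum,
         ((stats_list.filter (fun e => e.2.2.1 == month)).map (fun e => e.2.2.2.2)).sum])])
    (PySem.Dict.empty : PySem.Dict String (List (String × List Int)))).items

-- ===== PRECONDITION & SPEC =====
def Spec_get_iyc_list (months : List String) (stats_list : List (Int × Int × String × Int × Int)) (iyc_zone : String) (out : List (String × List (String × List Int))) : Prop := out = get_iyc_list_alt months stats_list iyc_zone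
instance (months : List String) (stats_list : List (Int × Int × String × Int × Int)) (iyc_zone : String) (out : List (String × List (String × List Int))) : Decidable (Spec_get_iyc_list months stats_list iyc_zone out) := by unfold Spec_get_iyc_list; infer_instance

-- ===== CLAIM (what is proved, stated in full; the proofs are below) =====
def Claim_equal_get_iyc_list : Prop := ∀ (months : List String) (stats_list : List (Int × Int × String × Int × Int)) (iyc_zone : String), Dom_get_iyc_list months stats_list iyc_zone → Spec_get_iyc_list months stats_list iyc_zone (get_iyc_list months stats_list iyc_zone)

-- ===== LEMMAS AND PROOFS =====

-- Counter loop with an arbitrary integer weight: final count at key m is the filtered sum.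
theorem getD_foldl_modify_addw {α : Type} (l : List α) (key : α → String) (w : α → Int)
    (d : PySem.Dict String Int) (m : String) :
    (l.foldl (fun d e => d.modify (key e) 0 (fun v => v + w e)) d).getD m 0
      = d.getD m 0 + ((l.filter (fun e => key e == m)).map w).sum := by
  induction l generalizing d with
  | nil => simp
  | cons a t ih =>
    simp only [List.foldl_cons, ih, PySem.Dict.getD_modify, List.filter_cons]
    by_cases h : key a = m
    · simp [h]; ring
    · simp [h, Ne.symm h]

theorem get_iyc_list_spec : Claim_equal_get_iyc_list := by
  intro months stats_list iyc_zone _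
  unfold Spec_get_iyc_list get_iyc_list get_iyc_list_alt
  have hfun : (fun (ml : PySem.Dict String (List (String × List Int))) (month : String) =>
      ml.insert month
        (((PySem.Dict.empty : PySem.Dict String (List Int)).update
          ((PySem.Dict.empty : PySem.Dict String (List Int)).insert iyc_zone
            [(stats_list.foldl (fun d e => d.modify e.2.2.1 0 (fun v => v + e.2.2.2.1)) PySem.Dict.empty).getD month 0,
             (stats_list.foldl (fun d e => d.modify e.2.2.1 0 (fun v => v + e.2.2.2.2)) PySem.Dict.empty).getD month 0]).items).items))
    = (fun (ml : PySem.Dict String (List (String × List Int))) (month : String) =>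
      ml.insert month [(iyc_zone,
        [((stats_list.filter (fun e => e.2.2.1 == month)).map (fun e => e.2.2.2.1)).sum,
         ((stats_list.filter (fun e => e.2.2.1 == month)).map (fun e => e.2.2.2.2)).sum])]) := by
    funext ml month
    rw [getD_foldl_modify_addw stats_list (fun e => e.2.2.1) (fun e => e.2.2.2.1),
        getD_foldl_modify_addw stats_list (fun e => e.2.2.1) (fun e => e.2.2.2.2)]
    simp [PySem.Dict.update, PySem.Dict.get?, PySem.Dict.insert, PySem.Dict.empty,
          PySem.Dict.contains, PySem.Dict.getD]
  simp only []
  rw [hfun]
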